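-- pv_equiv track=rewrite | github.com/ajnirp/advent-2024 | 7.py | AllNumbersUpTo
-- ===== SOURCE A (Python) =====
-- def ConvertToBase(number, base):
--     if base >= 10:
--         raise ValueError("I can only deal with bases < 10")
--     result = []
--     while number > 0:
--         result.append(str(number % base))
--         number //= base
--     return ''.join(reversed(result))
--
-- def Decrement(array, base):
--     if base >= 10:
--         raise ValueError("I can only deal with bases < 10")
--     if all(elem == '0' for elem in array):
--         return ValueError("The number to decrement must be > 0")
--     index = len(array) - 1
--     while index >= 0:
--         if array[index] != '0':
--             array[index] = str(int(array[index]) - 1)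
--             return
--         array[index] = str(base - 1)
--         index -= 1
--
-- def AllNumbersUpTo(upper, base):
--     if upper <= 0:
--         raise ValueError("`upper` must be > 0")
--     current = ConvertToBase(upper-1, base)
--     num_digits = len(current)
--     yield current
--     current_array = list(current)
--     for number in range(upper-2, -1, -1):
--         Decrement(current_array, base)
--         yield ''.join(current_array)
-- ===== SOURCE B (Python) =====
-- def ConvertToBase(number, base):
--     if base >= 10:
--         raise ValueError("I can only deal with bases < 10")
--     result = []
--     while number > 0:
--         result.append(str(number % base))
--         number //= base
--     return ''.join(reversed(result))
--
-- def AllNumbersUpTo(upper, base):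
--     if upper <= 0:
--         raise ValueError("`upper` must be > 0")
--     width = len(ConvertToBase(upper - 1, base))
--     for n in range(upper - 1, -1, -1):
--         r = ConvertToBase(n, base)
--         yield '0' * (width - len(r)) + r
-- ===== Notes on version B (the rewrite author's own statement) =====
-- stated objective: simpler
-- what changed: B drops the mutable digit array and the in-place Decrement helper entirely: it computes the fixed width once and yields each number's base representation recomputed directly and left-padded with zeros.
-- outside the precondition, e.g. on AllNumbersUpTo(3, -2): A returns ['0', '0', '0'], B returns ['0', '-1', '0']; on AllNumbersUpTo(2, -2): A returns ['-1', '-0'], B returns ['-1', '00']; on AllNumbersUpTo(2, 0): A raises ZeroDivisionError, B raises ZeroDivisionError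
import Mathlib
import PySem

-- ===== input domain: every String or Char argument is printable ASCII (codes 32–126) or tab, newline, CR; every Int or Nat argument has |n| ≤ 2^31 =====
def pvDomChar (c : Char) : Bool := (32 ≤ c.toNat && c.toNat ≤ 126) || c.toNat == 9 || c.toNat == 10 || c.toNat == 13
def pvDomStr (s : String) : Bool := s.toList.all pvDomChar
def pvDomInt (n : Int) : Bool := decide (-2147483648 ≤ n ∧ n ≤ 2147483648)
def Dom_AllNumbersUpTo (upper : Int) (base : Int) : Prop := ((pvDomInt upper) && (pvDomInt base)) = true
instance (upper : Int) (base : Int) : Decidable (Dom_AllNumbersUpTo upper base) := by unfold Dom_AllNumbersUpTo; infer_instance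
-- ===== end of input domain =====

-- B drops A's mutable digit array and in-place Decrement helper: it computes the width once and
-- recomputes each number's representation, left-padded with zeros.  A is a generator; both ports
-- are the list of yielded strings.

-- ===== PORT A =====
-- while number > 0: result.append(str(number % base)); number //= base
-- fuel number.toNat + 1 suffices: inside Pre_ either the loop never runs (number ≤ 0) or
-- base ≥ 2 and the value strictly decreases each step.  (The 'base >= 10' raise is outside Pre_.)
def pvConvLoop (base : Int) : Nat → Int → List String → List String
  | 0, _, result => result
  | fuel + 1, number, result =>
    if 0 < number then
      pvConvLoop base fuel (PySem.Int.floordiv number base)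
        (result ++ [PySem.Int.toStr (PySem.Int.mod number base)])
    else result
def ConvertToBase (number : Int) (base : Int) : String :=
  PySem.Str.join "" (pvConvLoop base (number.toNat + 1) number []).reverse
def pvDecLoop (base : Int) : Nat → List String → Int → List String
  | 0, array, _ => array
  | fuel + 1, array, index =>
    if 0 ≤ index then
      if PySem.List.pyGetD array index "" ≠ "0" then
        PySem.List.pySetD array index
          (PySem.Int.toStr ((PySem.Int.ofStr? (PySem.List.pyGetD array index "")).getD 0 - 1))
      else
        pvDecLoop base fuel (PySem.List.pySetD array index (PySem.Int.toStr (base - 1))) (index - 1)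
    else array
def Decrement (array : List String) (base : Int) : List String :=
  if array.all (fun elem => elem == "0") then array
  else pvDecLoop base array.length array ((array.length : Int) - 1)
def pvMainLoop (base : Int) : Nat → List String → List String → List String
  | 0, _, acc => acc
  | fuel + 1, arr, acc =>
    let arr' := Decrement arr base
    pvMainLoop base fuel arr' (acc ++ [PySem.Str.join "" arr'])

def AllNumbersUpTo (upper : Int) (base : Int) : List String :=
  if upper ≤ 0 then []
  else
    let current := ConvertToBase (upper - 1) base
    pvMainLoop base (upper - 1).toNat (current.toList.map (fun c => String.ofList [c])) [current]

-- ===== PORT B =====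
def AllNumbersUpTo_alt (upper : Int) (base : Int) : List String :=
  if upper ≤ 0 then []
  else
    let width := PySem.Str.len (ConvertToBase (upper - 1) base)
    (PySem.List.pyRange (upper - 1) (-1) (-1)).map (fun n =>
      let r := ConvertToBase n base
      String.ofList (List.replicate (width - PySem.Str.len r).toNat '0' ++ r.toList))

-- ===== PRECONDITION & SPEC =====
-- Pre_ excludes inputs on which A does not return a plain value or whose value is accidental:
-- upper ≤ 0 and base ≥ 10 (A raises ValueError), base = 0 with upper ≥ 2 (ZeroDivisionError),
-- base = 1 with upper ≥ 2 (A loops forever), and negative bases with upper ≥ 2, where A either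
-- raises (int('-')) or returns accidental strings from char-wise decrement of a signed
-- representation — a corner no one would specify; B returns the direct representations there.
def Pre_AllNumbersUpTo (upper : Int) (base : Int) : Prop :=
  1 ≤ upper ∧ base ≤ 9 ∧ (2 ≤ base ∨ upper = 1)
instance (upper : Int) (base : Int) : Decidable (Pre_AllNumbersUpTo upper base) := by
  unfold Pre_AllNumbersUpTo; infer_instance

def pvWitness_AllNumbersUpTo : Int × Int := (5, 2)

def Spec_AllNumbersUpTo (upper : Int) (base : Int) (out : List String) : Prop := out = AllNumbersUpTo_alt upper base
instance (upper : Int) (base : Int) (out : List String) : Decidable (Spec_AllNumbersUpTo upper base out) := by unfold Spec_AllNumbersUpTo; infer_instance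

-- ===== CLAIM (what is proved, stated in full; the proofs are below) =====
def Claim_equal_AllNumbersUpTo : Prop := ∀ (upper : Int) (base : Int), Dom_AllNumbersUpTo upper base → Pre_AllNumbersUpTo upper base → Spec_AllNumbersUpTo upper base (AllNumbersUpTo upper base)

-- ===== LEMMAS AND PROOFS =====

-- proof-side abbreviations: singleton string, digit character, digit row, zero-padded digit row
def pvSing (c : Char) : String := String.ofList [c]
def pvDch (d : Nat) : Char := Char.ofNat (48 + d)
def pvCells (B n : Nat) : List Char := ((Nat.digits B n).map pvDch).reverse
def pvPad (B w n : Nat) : List Char :=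
  List.replicate (w - (Nat.digits B n).length) '0' ++ pvCells B n

theorem pv_cell_eq (d : Nat) (hd : d ≤ 9) : PySem.Int.toStr (d : Int) = pvSing (pvDch d) := by
  interval_cases d <;> decide

theorem pv_conv_loop (B : Nat) (hB : 2 ≤ B) : ∀ (fuel n : Nat) (res : List String), n < fuel →
    pvConvLoop (B : Int) fuel (n : Int) res
      = res ++ (Nat.digits B n).map (fun (d : Nat) => PySem.Int.toStr (d : Int)) := by
  intro fuel
  induction fuel with
  | zero => omega
  | succ f ih =>
    intro n res hn
    rcases Nat.eq_zero_or_pos n with h0 | h0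
    · subst h0; simp [pvConvLoop]
    · have hlt : (0 : Int) < (n : Int) := by exact_mod_cast h0
      rw [pvConvLoop, if_pos hlt, PySem.Int.floordiv_natCast, PySem.Int.mod_natCast,
        ih (n / B) _ (by
          have : n / B < n := Nat.div_lt_self h0 (by omega)
          omega)]
      rw [Nat.digits_def' (by omega : 1 < B) h0]
      simp


theorem pv_join_sing (cs : List Char) : PySem.Str.join "" (cs.map pvSing) = String.ofList cs := by
  have h : (PySem.Str.join "" (cs.map pvSing)).toList = cs := by
    have := PySem.Chars.join_nil_singletons cs
    simp [pvSing, Function.comp_def]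
  have h2 : (PySem.Str.join "" (cs.map pvSing)).toList = (String.ofList cs).toList := by
    simpa using h
  exact String.toList_inj.mp h2

theorem pv_rep (B : Nat) (hB : 2 ≤ B) (hB9 : B ≤ 9) (n : Nat) :
    ConvertToBase (n : Int) (B : Int) = String.ofList (pvCells B n) := by
  unfold ConvertToBase
  rw [Int.toNat_natCast, pv_conv_loop B hB (n+1) n [] (by omega), List.nil_append]
  have hmap : (Nat.digits B n).map (fun (d : Nat) => PySem.Int.toStr (d : Int))
      = (Nat.digits B n).map (fun d => pvSing (pvDch d)) := by
    apply List.map_congr_left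
    intro d hd
    exact pv_cell_eq d (by have := Nat.digits_lt_base (by omega) hd; omega)
  rw [hmap]
  have harg : ((Nat.digits B n).map (fun d => pvSing (pvDch d))).reverse = (pvCells B n).map pvSing := by
    simp [pvCells, List.map_reverse, List.map_map, Function.comp_def]
  rw [harg, pv_join_sing]
-- L0: an index strictly left of the last cell never touches it
theorem pv_decLoop_append (base : Int) : ∀ (fuel : Nat) (xs : List String) (d : String) (i : Int),
    i < (xs.length : Int) →
    pvDecLoop base fuel (xs ++ [d]) i = pvDecLoop base fuel xs i ++ [d] := by
  intro fuel
  induction fuel with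
  | zero => intro xs d i _; simp [pvDecLoop]
  | succ f ih =>
    intro xs d i hi
    by_cases h0 : 0 ≤ i
    · have hget : PySem.List.pyGetD (xs ++ [d]) i "" = PySem.List.pyGetD xs i "" := by
        rw [PySem.List.pyGetD_eq_getElem (xs ++ [d]) "" h0 (by simp; omega),
            PySem.List.pyGetD_eq_getElem xs "" h0 (by omega)]
        rw [List.getElem_append_left (by omega)]
      have hset : ∀ v, PySem.List.pySetD (xs ++ [d]) i v = PySem.List.pySetD xs i v ++ [d] := by
        intro v
        rw [PySem.List.pySetD_of_nonneg (xs ++ [d]) v h0, PySem.List.pySetD_of_nonneg xs v h0,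
            List.set_append_left _ _ (by omega)]
      rw [pvDecLoop, pvDecLoop, if_pos h0, if_pos h0, hget]
      by_cases hz : PySem.List.pyGetD xs i "" ≠ "0"
      · rw [if_pos hz, if_pos hz, hset]
      · rw [if_neg hz, if_neg hz, hset, ih _ _ _ (by rw [PySem.List.pySetD_of_nonneg xs _ h0]; simp; omega)]
    · rw [pvDecLoop, pvDecLoop, if_neg h0, if_neg h0]

theorem pv_decLoop_last_ne (base : Int) (f : Nat) (xs : List String) (c : String) (hc : c ≠ "0") :
    pvDecLoop base (f + 1) (xs ++ [c]) (xs.length : Int)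
      = xs ++ [PySem.Int.toStr ((PySem.Int.ofStr? c).getD 0 - 1)] := by
  have hget : PySem.List.pyGetD (xs ++ [c]) (xs.length : Int) "" = c := by
    rw [PySem.List.pyGetD_eq_getElem (xs ++ [c]) "" (by positivity) (by simp)]
    simp
  rw [pvDecLoop, if_pos (by positivity : (0:Int) ≤ (xs.length : Int)), hget, if_pos hc,
      PySem.List.pySetD_of_nonneg _ _ (by positivity)]
  simp

theorem pv_decLoop_last_zero (base : Int) (f : Nat) (xs : List String) :
    pvDecLoop base (f + 1) (xs ++ ["0"]) (xs.length : Int)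
      = pvDecLoop base f xs ((xs.length : Int) - 1) ++ [PySem.Int.toStr (base - 1)] := by
  have hget : PySem.List.pyGetD (xs ++ ["0"]) (xs.length : Int) "" = "0" := by
    rw [PySem.List.pyGetD_eq_getElem (xs ++ ["0"]) "" (by positivity) (by simp)]
    simp
  rw [pvDecLoop, if_pos (by positivity : (0:Int) ≤ (xs.length : Int)), hget, if_neg (by simp),
      PySem.List.pySetD_of_nonneg _ _ (by positivity)]
  rw [Int.toNat_natCast, List.set_append_right _ _ (by omega)]
  simp only [Nat.sub_self, List.set_cons_zero]
  rw [pv_decLoop_append base f xs _ _ (by omega)]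
theorem pv_cell_dec (r : Nat) (h1 : 1 ≤ r) (h9 : r ≤ 9) :
    PySem.Int.toStr ((PySem.Int.ofStr? (pvSing (pvDch r))).getD 0 - 1) = pvSing (pvDch (r - 1)) := by
  interval_cases r <;> decide

theorem pv_cell_ne (r : Nat) (h1 : 1 ≤ r) (h9 : r ≤ 9) : pvSing (pvDch r) ≠ "0" := by
  interval_cases r <;> decide

theorem pv_pad_length (B w n : Nat) (h : (Nat.digits B n).length ≤ w) :
    (pvPad B w n).length = w := by
  simp [pvPad, pvCells]; omega

theorem pv_pad_split (B w n q r : Nat) (hd : Nat.digits B n = r :: Nat.digits B q)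
    (hw : (Nat.digits B n).length ≤ w) :
    pvPad B w n = pvPad B (w - 1) q ++ [pvDch r] := by
  have hlen : (Nat.digits B n).length = (Nat.digits B q).length + 1 := by rw [hd]; simp
  simp only [pvPad, pvCells, hd, List.map_cons, List.reverse_cons, List.append_assoc]
  congr 2
  simp at hlen ⊢
  omega

theorem pv_dec_pad (B : Nat) (hB : 2 ≤ B) (hB9 : B ≤ 9) :
    ∀ m w, (Nat.digits B (m+1)).length ≤ w →
    pvDecLoop (B : Int) w ((pvPad B w (m+1)).map pvSing) ((w : Int) - 1)
      = (pvPad B w m).map pvSing := by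
  intro m
  induction m using Nat.strong_induction_on with
  | _ m ih =>
    intro w hw
    have hB1 : 1 < B := by omega
    have hwpos : 1 ≤ w := by
      have h1 := (Nat.digits_ne_nil_iff_ne_zero (b := B)).mpr (by omega : m + 1 ≠ 0)
      have h2 := List.length_pos_iff.mpr h1
      omega
    obtain ⟨W, rfl⟩ : ∃ W, w = W + 1 := ⟨w - 1, by omega⟩
    have hqr : B * ((m+1)/B) + (m+1)%B = m+1 := Nat.div_add_mod _ _
    have hrB : (m+1)%B < B := Nat.mod_lt _ (by omega)
    have hd1 : Nat.digits B (m+1) = (m+1)%B :: Nat.digits B ((m+1)/B) :=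
      Nat.digits_def' hB1 (by omega)
    generalize hQ : (m+1)/B = q at hd1 hqr
    generalize hR : (m+1)%B = r at hd1 hqr hrB
    clear hQ hR
    have hlen1 : (Nat.digits B (m+1)).length = (Nat.digits B q).length + 1 := by rw [hd1]; simp
    have hpow : m + 1 < B ^ (W + 1) := (Nat.digits_length_le_iff hB1 _).mp hw
    have hlenm : (Nat.digits B m).length ≤ W + 1 :=
      (Nat.digits_length_le_iff hB1 _).mpr (by omega)
    have hsplit : pvPad B (W+1) (m+1) = pvPad B W q ++ [pvDch r] := by
      have := pv_pad_split B (W+1) (m+1) q r hd1 hw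
      simpa using this
    have hplen : ((pvPad B W q).map pvSing).length = W := by
      rw [List.length_map]; exact pv_pad_length B W q (by omega)
    have hidx : ((W + 1 : Nat) : Int) - 1 = (((pvPad B W q).map pvSing).length : Int) := by
      rw [hplen]; push_cast; ring
    rw [hsplit, List.map_append, List.map_singleton]
    by_cases hr0 : r = 0
    · -- last cell is '0': set it to base-1 and recurse left
      have hq1 : 1 ≤ q := by
        rcases Nat.eq_zero_or_pos q with h | h
        · rw [h, Nat.mul_zero] at hqr; omega
        · exact h
      have hBq : B * q = B * (q - 1) + B := by
        have h1 : q - 1 + 1 = q := by omega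
        calc B * q = B * ((q - 1) + 1) := by rw [h1]
          _ = B * (q - 1) + B := by ring
      have h2q : 2 * q ≤ B * q := Nat.mul_le_mul_right q hB
      have hsing0 : pvSing (pvDch r) = "0" := by rw [hr0]; decide
      rw [hsing0, hidx, pv_decLoop_last_zero]
      have hrec : pvDecLoop (B : Int) W ((pvPad B W q).map pvSing)
          ((((pvPad B W q).map pvSing).length : Int) - 1) = (pvPad B W (q-1)).map pvSing := by
        rw [hplen]
        have hq' : q - 1 + 1 = q := by omega
        have := ih (q - 1) (by omega) W (by rw [hq']; omega)
        rwa [hq'] at this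
      rw [hrec]
      have hcell : PySem.Int.toStr ((B : Int) - 1) = pvSing (pvDch (B - 1)) := by
        have hc : ((B : Int) - 1) = ((B - 1 : Nat) : Int) := by omega
        rw [hc, pv_cell_eq (B-1) (by omega)]
      rw [hcell]
      have hm' : m = (B - 1) + B * (q - 1) := by omega
      have hmq : m / B = q - 1 := by
        rw [hm', Nat.add_mul_div_left _ _ (by omega : 0 < B),
            Nat.div_eq_of_lt (by omega), Nat.zero_add]
      have hmr : m % B = B - 1 := by
        rw [hm', Nat.add_mul_mod_self_left, Nat.mod_eq_of_lt (by omega)]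
      have hdm : Nat.digits B m = (B - 1) :: Nat.digits B (q - 1) := by
        rw [Nat.digits_def' hB1 (by omega : 0 < m), hmq, hmr]
      have := pv_pad_split B (W+1) m (q-1) (B-1) hdm hlenm
      simp only [Nat.add_sub_cancel] at this
      rw [this, List.map_append, List.map_singleton]
    · -- last cell is a nonzero digit: decrement it in place
      have hr9 : r ≤ 9 := by omega
      have hcell := pv_cell_ne r (by omega) hr9
      rw [hidx, pv_decLoop_last_ne _ _ _ _ hcell, pv_cell_dec r (by omega) hr9]
      rcases Nat.eq_zero_or_pos m with hm0 | hm0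
      · -- m = 0: everything becomes the all-zero row
        have hq0 : q = 0 := by
          rcases Nat.eq_zero_or_pos q with h | h
          · exact h
          · have := Nat.le_mul_of_pos_right B h; omega
        rw [hq0, Nat.mul_zero] at hqr
        have hr1 : r = 1 := by omega
        subst hm0
        rw [hq0, hr1]
        have h00 : pvSing (pvDch (1 - 1)) = "0" := by decide
        have h01 : pvSing '0' = "0" := by decide
        simp only [pvPad, pvCells, Nat.digits_zero, List.map_nil, List.reverse_nil,
          List.append_nil, List.length_nil, Nat.sub_zero, List.map_replicate, h00, h01]
        rw [← List.replicate_succ']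
      · have hm' : m = (r - 1) + B * q := by omega
        have hmq : m / B = q := by
          rw [hm', Nat.add_mul_div_left _ _ (by omega : 0 < B),
              Nat.div_eq_of_lt (by omega), Nat.zero_add]
        have hmr : m % B = r - 1 := by
          rw [hm', Nat.add_mul_mod_self_left, Nat.mod_eq_of_lt (by omega)]
        have hdm : Nat.digits B m = (r - 1) :: Nat.digits B q := by
          rw [Nat.digits_def' hB1 hm0, hmq, hmr]
        have := pv_pad_split B (W+1) m q (r-1) hdm hlenm
        simp only [Nat.add_sub_cancel] at this
        rw [this, List.map_append, List.map_singleton]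
theorem pv_guard (B : Nat) (hB : 2 ≤ B) (hB9 : B ≤ 9) (n w : Nat) (hn : n ≠ 0) :
    ((pvPad B w n).map pvSing).all (fun elem => elem == "0") = false := by
  have hne : Nat.digits B n ≠ [] := (Nat.digits_ne_nil_iff_ne_zero (b := B)).mpr hn
  have hd0 : (Nat.digits B n).getLast hne ≠ 0 := Nat.getLast_digit_ne_zero B hn
  have hmem : (Nat.digits B n).getLast hne ∈ Nat.digits B n := List.getLast_mem hne
  have hlt : (Nat.digits B n).getLast hne < B := Nat.digits_lt_base (by omega) hmem
  rw [List.all_eq_false]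
  refine ⟨pvSing (pvDch ((Nat.digits B n).getLast hne)), ?_, ?_⟩
  · apply List.mem_map_of_mem
    simp only [pvPad, pvCells]
    apply List.mem_append_right
    rw [List.mem_reverse]
    exact List.mem_map_of_mem hmem
  · have := pv_cell_ne ((Nat.digits B n).getLast hne) (by omega) (by omega)
    simpa using this

theorem pv_Decrement_pad (B : Nat) (hB : 2 ≤ B) (hB9 : B ≤ 9) (m w : Nat)
    (hw : (Nat.digits B (m+1)).length ≤ w) :
    Decrement ((pvPad B w (m+1)).map pvSing) (B : Int) = (pvPad B w m).map pvSing := by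
  unfold Decrement
  rw [if_neg (by rw [pv_guard B hB hB9 (m+1) w (by omega)]; simp)]
  rw [List.length_map, pv_pad_length B w (m+1) hw, pv_dec_pad B hB hB9 m w hw]

theorem pv_main (B : Nat) (hB : 2 ≤ B) (hB9 : B ≤ 9) :
    ∀ (k : Nat) (w : Nat) (acc : List String), k < B ^ w →
    pvMainLoop (B : Int) k ((pvPad B w k).map pvSing) acc
      = acc ++ ((List.range k).reverse.map (fun j => String.ofList (pvPad B w j))) := by
  intro k
  induction k with
  | zero => intro w acc _; simp [pvMainLoop]
  | succ k ih =>
    intro w acc hk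
    have hw : (Nat.digits B (k+1)).length ≤ w := (Nat.digits_length_le_iff (by omega) _).mpr hk
    rw [pvMainLoop]
    simp only [pv_Decrement_pad B hB hB9 k w hw]
    rw [ih w _ (by
      calc k < k + 1 := by omega
        _ < B ^ w := hk)]
    rw [pv_join_sing, List.range_succ]
    simp
theorem pv_main_case (upper base : Int) (h1 : 1 ≤ upper) (h2 : 2 ≤ base) (h9 : base ≤ 9) :
    AllNumbersUpTo upper base = AllNumbersUpTo_alt upper base := by
  obtain ⟨u, rfl⟩ : ∃ u : Nat, upper = (u : Int) := ⟨upper.toNat, by omega⟩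
  obtain ⟨B, rfl⟩ : ∃ b : Nat, base = (b : Int) := ⟨base.toNat, by omega⟩
  have hB : 2 ≤ B := by exact_mod_cast h2
  have hB9 : B ≤ 9 := by exact_mod_cast h9
  have hu : 1 ≤ u := by exact_mod_cast h1
  have hB1 : 1 < B := by omega
  set w := (Nat.digits B (u - 1)).length with hwdef
  have hcast : ((u : Int) - 1) = (((u - 1 : Nat)) : Int) := by omega
  have hpow : u - 1 < B ^ w := Nat.lt_base_pow_length_digits hB1
  have hrep : ∀ n : Nat, ConvertToBase (n : Int) (B : Int) = String.ofList (pvCells B n) :=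
    pv_rep B hB hB9
  have hup : ¬ ((u : Int) ≤ 0) := by omega
  -- A side
  have hA : AllNumbersUpTo (u : Int) (B : Int)
      = (List.range u).reverse.map (fun j => String.ofList (pvPad B w j)) := by
    simp only [AllNumbersUpTo, if_neg hup]
    rw [hcast, hrep (u-1)]
    have htl : (String.ofList (pvCells B (u-1))).toList.map (fun c => String.ofList [c])
        = (pvPad B w (u-1)).map pvSing := by
      simp [pvPad, pvSing, hwdef, pvCells]
    rw [htl]
    rw [Int.toNat_natCast, pv_main B hB hB9 (u-1) w [String.ofList (pvCells B (u-1))] hpow]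
    have hcur : pvCells B (u - 1) = pvPad B w (u-1) := by
      simp [pvPad, hwdef]
    rw [hcur]
    obtain ⟨v, rfl⟩ : ∃ v, u = v + 1 := ⟨u - 1, by omega⟩
    rw [List.range_succ]
    simp
  -- B side
  have hBside : AllNumbersUpTo_alt (u : Int) (B : Int)
      = (List.range u).map (fun k => String.ofList (pvPad B w (u - 1 - k))) := by
    simp only [AllNumbersUpTo_alt, if_neg hup]
    rw [hcast, hrep (u-1)]
    have hwidth : PySem.Str.len (String.ofList (pvCells B (u-1))) = (w : Int) := by
      simp [pvCells, hwdef]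
    rw [hwidth]
    rw [PySem.List.pyRange_neg_one]
    have hcnt : (((u - 1 : Nat) : Int) - (-1)).toNat = u := by omega
    rw [hcnt, List.map_map]
    apply List.map_congr_left
    intro k hk
    rw [List.mem_range] at hk
    have hkcast : (((u - 1 : Nat) : Int) - (k : Int)) = (((u - 1 - k : Nat)) : Int) := by omega
    simp only [Function.comp_def, hkcast, hrep (u - 1 - k)]
    have hlenk : (Nat.digits B (u - 1 - k)).length ≤ w := by
      apply (Nat.digits_length_le_iff hB1 _).mpr
      omega
    have hlr : PySem.Str.len (String.ofList (pvCells B (u - 1 - k))) = ((Nat.digits B (u-1-k)).length : Int) := by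
      simp [pvCells]
    rw [hlr]
    have htn : ((w : Int) - ((Nat.digits B (u-1-k)).length : Int)).toNat
        = w - (Nat.digits B (u-1-k)).length := by omega
    rw [htn]
    simp [pvPad]
  rw [hA, hBside]
  apply List.ext_getElem
  · simp
  · intro i h1' h2'
    simp only [List.getElem_map, List.getElem_reverse, List.length_range, List.getElem_range]
theorem pv_one_case (base : Int) : AllNumbersUpTo 1 base = AllNumbersUpTo_alt 1 base := by
  have h1 : pvConvLoop base 1 0 [] = [] := by simp [pvConvLoop]
  have hcur : ConvertToBase 0 base = "" := by
    rw [ConvertToBase]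
    norm_num [h1]
    decide
  have hrange : PySem.List.pyRange 0 (-1) (-1) = [0] := by decide
  simp [AllNumbersUpTo, AllNumbersUpTo_alt, pvMainLoop, hrange, hcur]

-- ===== VERDICT (by name: the statement is the Claim_ definition above) =====
theorem AllNumbersUpTo_spec : Claim_equal_AllNumbersUpTo := by
  intro upper base _ hpre
  obtain ⟨h1, h9, hc⟩ := hpre
  unfold Spec_AllNumbersUpTo
  rcases hc with h2 | h1eq
  · exact pv_main_case upper base h1 h2 h9
  · subst h1eq
    exact pv_one_case base
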